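-- pv_equiv track=rewrite | github.com/IsakEd/AdventOfCode2023 | 7/others.py | compare_for_second_part
-- ===== SOURCE A (Python) =====
-- import collections
-- import itertools
--
-- FIVE_OF_KIND = 7
--
-- FOUR_OF_KIND = 6
--
-- FULL_HOUSE = 5
--
-- THREE_OF_KIND = 4
--
-- TWO_PAIRS = 3
--
-- ONE_PAIR = 2
--
-- HIGH_CARD = 1
--
-- def get_value_card(hand):
--     individual_cards = collections.Counter(hand)
--
--     if len(individual_cards) == 1:
--         return FIVE_OF_KIND
--
--     if len(individual_cards) == 2:
--         if 3 in individual_cards.values():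
--             if 2 in individual_cards.values():
--                 return FULL_HOUSE
--
--         if 4 in individual_cards.values():
--             return FOUR_OF_KIND
--
--         raise Exception("?")
--
--     if len(individual_cards) == 3:
--         if 3 in individual_cards.values():
--             return THREE_OF_KIND
--
--         s = 0
--         for c, i in individual_cards.items():
--             if i == 2:
--                 s += 1
--
--         if s == 2:
--             return TWO_PAIRS
--
--     if 2 in individual_cards.values():
--         return ONE_PAIR
--
--     return HIGH_CARD
--
-- def get_hand_combinations(prefix, index, hand, possibilities):
--     if index == 5:
--         yield prefix
--         return
--
--     if hand[index] == "J":
--         for p in possibilities: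
--             yield from get_hand_combinations(prefix + p, index + 1, hand, possibilities)
--     else:
--         yield from get_hand_combinations(
--             prefix + hand[index], index + 1, hand, possibilities
--         )
--
-- def get_value_card_with_jokers(hand):
--     if "J" not in hand:
--         return get_value_card(hand)
--
--     if hand == "JJJJJ":
--         return FIVE_OF_KIND
--
--     possibilities = set(c for c in hand if c != "J")
--     return max(
--         get_value_card(h) for h in get_hand_combinations("", 0, hand, possibilities)
--     )
--
-- def compare_for_second_part(item1, item2):
--     CARD_VALUES = {c: b for c, b in zip("AKQT98765432J"[::-1], itertools.count(1))}
--
--     t1 = get_value_card_with_jokers(item1[0])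
--     t2 = get_value_card_with_jokers(item2[0])
--
--     if t1 > t2:
--         return 1
--
--     if t1 < t2:
--         return -1
--
--     for c1, c2 in zip(item1[0], item2[0]):
--         if c1 == c2:
--             continue
--
--         return CARD_VALUES[c1] - CARD_VALUES[c2]
--
--     return 0
-- ===== SOURCE B (Python) =====
-- def compare_for_second_part(item1, item2):
--     ORDER = "J23456789TQKA"
--
--     def classify(counts):
--         # hand type from the multiset of per-card counts
--         if len(counts) == 1:
--             return 7
--         if len(counts) == 2:
--             if 3 in counts and 2 in counts:
--                 return 5
--             if 4 in counts:
--                 return 6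
--         if len(counts) == 3:
--             if 3 in counts:
--                 return 4
--             if counts.count(2) == 2:
--                 return 3
--         return 2 if 2 in counts else 1
--
--     def strength(hand):
--         # optimal joker play: every joker joins the most frequent other card
--         jokers = hand.count("J")
--         counts = sorted((hand.count(c) for c in set(hand) if c != "J"), reverse=True)
--         if jokers:
--             if counts:
--                 counts[0] += jokers
--             else:
--                 counts = [jokers]
--         return classify(counts)
--
--     t1 = strength(item1[0])
--     t2 = strength(item2[0])
--     if t1 != t2:
--         return 1 if t1 > t2 else -1
--     for c1, c2 in zip(item1[0], item2[0]):
--         if c1 != c2: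
--             return ORDER.index(c1) - ORDER.index(c2)
--     return 0
-- ===== Notes on version B (the rewrite author's own statement) =====
-- stated objective: alternative
-- what changed: A evaluates a hand by generating every joker substitution (up to 4^5 candidate hands, each re-counted with a Counter) and taking the max; B counts the jokers once, adds the joker count to the largest other-card count and classifies that count shape directly. …
-- outside the precondition, e.g. on compare_for_second_part(['KKJAAA'], ['22233']): A returns 10, B returns 1; on compare_for_second_part(['JJJAA'], ['xyzzz']): A returns 1, B returns 1
import Mathlib
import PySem

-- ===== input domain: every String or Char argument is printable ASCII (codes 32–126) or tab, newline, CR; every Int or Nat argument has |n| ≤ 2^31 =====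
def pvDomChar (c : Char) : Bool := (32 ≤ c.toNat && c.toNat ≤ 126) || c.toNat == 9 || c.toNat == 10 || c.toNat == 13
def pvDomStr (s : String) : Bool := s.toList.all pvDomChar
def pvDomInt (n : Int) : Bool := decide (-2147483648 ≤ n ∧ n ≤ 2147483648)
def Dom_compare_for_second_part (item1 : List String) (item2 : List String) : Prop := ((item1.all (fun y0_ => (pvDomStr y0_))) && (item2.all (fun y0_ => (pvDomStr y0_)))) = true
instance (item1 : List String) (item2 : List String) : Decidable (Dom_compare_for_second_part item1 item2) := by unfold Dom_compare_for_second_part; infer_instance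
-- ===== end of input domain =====

-- B replaces A's brute-force maximum over all joker substitutions by a direct computation:
-- add the joker count to the largest other-card count and classify that count shape once.
-- Objective: alternative (a genuinely different algorithm; not measurably faster here).

-- ===== PORT A =====

-- "AKQT98765432J" as its character list (shared by Pre_ and the CARD_VALUES table)
def pvCards : List Char := ['A', 'K', 'Q', 'T', '9', '8', '7', '6', '5', '4', '3', '2', 'J']

-- get_value_card; `none` = Python's `raise Exception("?")`
def pvA_get_value_card (hand : List Char) : Option Int :=
  let individual_cards := PySem.Dict.counter hand       -- collections.Counter(hand)
  if PySem.Dict.size individual_cards = 1 then some 7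
  else if PySem.Dict.size individual_cards = 2 then
    (if (PySem.Dict.values individual_cards).contains 3 && (PySem.Dict.values individual_cards).contains 2
     then some 5
     else if (PySem.Dict.values individual_cards).contains 4 then some 6
     else none)                                         -- raise Exception("?")
  else
    -- Python falls through the `len == 3` block into the common tail
    let step : Option Int :=
      if PySem.Dict.size individual_cards = 3 then
        if (PySem.Dict.values individual_cards).contains 3 then some 4
        else
          -- s = 0 ; for c, i in individual_cards.items(): if i == 2: s += 1
          let s := (PySem.Dict.items individual_cards).foldl
                     (fun s p => if p.2 == (2 : Int) then s + 1 else s) (0 : Int)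
          if s = 2 then some 3 else none
      else none
    match step with
    | some v => some v
    | none =>
      if (PySem.Dict.values individual_cards).contains 2 then some 2 else some 1

-- get_hand_combinations; the generator's yields, in order. `index` is a Nat counter, so
-- Python's hand[index] is `hand[index]?` (none = IndexError).
def pvA_get_hand_combinations (pre : List Char) (index : Nat) (hand : List Char)
    (possibilities : List Char) : Option (List (List Char)) :=
  if index = 5 then some [pre]
  else
    match h : hand[index]? with
    | none => none
    | some c =>
      if c = 'J' then
        (possibilities.mapM (fun p =>
          pvA_get_hand_combinations (pre ++ [p]) (index + 1) hand possibilities)).map List.flatten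
      else
        pvA_get_hand_combinations (pre ++ [c]) (index + 1) hand possibilities
  termination_by hand.length - index
  decreasing_by
    all_goals
      have hlt : index < hand.length := (List.getElem?_eq_some_iff.mp h).1
      omega

-- get_value_card_with_jokers; `none` = an exception escaping (max() on [] cannot happen here)
def pvA_get_value_card_with_jokers (hand : List Char) : Option Int :=
  if ¬ hand.contains 'J' then pvA_get_value_card hand
  else if hand = ['J', 'J', 'J', 'J', 'J'] then some 7  -- hand == "JJJJJ"
  else
    let possibilities : PySem.Set Char := PySem.Set.ofList (hand.filter (fun c => c ≠ 'J'))
    match pvA_get_hand_combinations [] 0 hand possibilities with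
    | none => none
    | some hs =>
      match hs.mapM pvA_get_value_card with
      | none => none
      | some vs => PySem.List.max? vs (fun v => v)     -- max(...); none = ValueError on empty

-- CARD_VALUES = {c: b for c, b in zip("AKQT98765432J"[::-1], itertools.count(1))}
-- "[::-1]" is List.reverse; zip with count(1) pairs the k-th char with k+1 (exact: zip stops at the string)
def pvA_card_values : PySem.Dict Char Int :=
  PySem.Dict.ofList
    (pvCards.reverse.zip ((List.range pvCards.reverse.length).map (fun i => (i : Int) + 1)))

-- the final `for c1, c2 in zip(...)` loop; none = KeyError on CARD_VALUES[c]
def pvA_tie_loop (pairs : List (Char × Char)) : Option Int :=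
  match pairs with
  | [] => some 0
  | (c1, c2) :: rest =>
    if c1 = c2 then pvA_tie_loop rest
    else
      match pvA_card_values.get? c1, pvA_card_values.get? c2 with
      | some v1, some v2 => some (v1 - v2)
      | _, _ => none

def compare_for_second_part (item1 : List String) (item2 : List String) : Int :=
  (match PySem.List.pyGet? item1 0, PySem.List.pyGet? item2 0 with   -- item1[0], item2[0]
   | some s1, some s2 =>
     match pvA_get_value_card_with_jokers s1.toList, pvA_get_value_card_with_jokers s2.toList with
     | some t1, some t2 =>
       if t1 > t2 then some 1
       else if t1 < t2 then some (-1)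
       else pvA_tie_loop (s1.toList.zip s2.toList)
     | _, _ => none
   | _, _ => none).getD 0                               -- none = Python raises (outside Pre_)

-- ===== PORT B =====

-- sorted(..., reverse=True) on a list of ints
def pvB_dsort (l : List Int) : List Int := PySem.List.sorted l (fun x => x) true

-- B's classify(): hand type from the multiset of per-card counts; Python's early returns
-- become Option-chaining
def pvB_classify (counts : List Int) : Int :=
  if counts.length = 1 then 7
  else
    let step2 : Option Int :=
      if counts.length = 2 then
        if counts.contains 3 && counts.contains 2 then some 5
        else if counts.contains 4 then some 6
        else none
      else none
    match step2 with
    | some v => v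
    | none =>
      let step3 : Option Int :=
        if counts.length = 3 then
          if counts.contains 3 then some 4
          else if counts.count 2 = 2 then some 3 else none
        else none
      match step3 with
      | some v => v
      | none => if counts.contains 2 then 2 else 1

-- B's strength(): jokers = hand.count("J"); counts = sorted counts of the other cards,
-- descending; the jokers join the largest group (or form their own if there is none); classify
def pvB_strength (hand : List Char) : Int :=
  let jokers := hand.count 'J'
  let counts := pvB_dsort (((PySem.Set.ofList hand).filter (fun c => c ≠ 'J')).map
      (fun c => (hand.count c : Int)))
  pvB_classify (if jokers ≠ 0 then
      (match counts with
       | [] => [(jokers : Int)]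
       | c :: rest => (c + (jokers : Int)) :: rest)
    else counts)

-- ORDER = "J23456789TQKA" as its character list
def pvB_order : List Char := ['J', '2', '3', '4', '5', '6', '7', '8', '9', 'T', 'Q', 'K', 'A']

-- B's tie-break loop; ORDER.index(c) is PySem.List.index? (none = ValueError)
def pvB_tie_loop (pairs : List (Char × Char)) : Option Int :=
  match pairs with
  | [] => some 0
  | (c1, c2) :: rest =>
    if c1 = c2 then pvB_tie_loop rest
    else
      match PySem.List.index? pvB_order c1, PySem.List.index? pvB_order c2 with
      | some i1, some i2 => some ((i1 : Int) - (i2 : Int))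
      | _, _ => none

def compare_for_second_part_alt (item1 : List String) (item2 : List String) : Int :=
  (match PySem.List.pyGet? item1 0, PySem.List.pyGet? item2 0 with  -- item1[0], item2[0]
   | some s1, some s2 =>
     let t1 := pvB_strength s1.toList
     let t2 := pvB_strength s2.toList
     if t1 ≠ t2 then some (if t1 > t2 then 1 else -1)
     else pvB_tie_loop (s1.toList.zip s2.toList)
   | _, _ => none).getD 0                               -- none = Python raises (outside Pre_)

-- ===== PRECONDITION & SPEC =====

-- a count shape A's classifier accepts (A raises "?" on two-group shapes other than {4,1}/{3,2})
def pvShapeOK (h : List Char) : Bool :=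
  (!(((PySem.Set.ofList h).map (fun c => (h.count c : Int))).length == 2))
    || (((PySem.Set.ofList h).map (fun c => (h.count c : Int))).contains 3
        && ((PySem.Set.ofList h).map (fun c => (h.count c : Int))).contains 2)
    || ((PySem.Set.ofList h).map (fun c => (h.count c : Int))).contains 4

-- a hand A evaluates and B matches: with jokers, the natural 5-card size (below it A's
-- substitution search raises IndexError; above it A rewrites only the first five cards, an
-- accident of its recursion); joker-free, any hand with an acceptable count shape
def pvHandOK (h : List Char) : Bool :=
  if h.contains 'J' then h.length == 5
  else pvShapeOK h

-- a hand on which A's evaluation merely returns (used only for the equal-hands disjunct,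
-- where both programs answer 0 whatever the hands are worth)
def pvAOK (h : List Char) : Bool :=
  if h.contains 'J' then
    (h == ['J', 'J', 'J', 'J', 'J']) || (decide (5 ≤ h.length) && h.any (fun c => !(c == 'J')))
  else pvShapeOK h

-- the hand type, where it is determined by the count shape alone (joker-free hands and the
-- all-joker hand); joker hands otherwise are left undetermined
def pvPreRank (h : List Char) : Option Int :=
  if h = ['J', 'J', 'J', 'J', 'J'] then some 7
  else if h.contains 'J' then none
  else some (pvB_classify ((PySem.Set.ofList h).map (fun c => (h.count c : Int))))

-- the first differing character pair of the two hands (if any) lies in the card table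
def pvTieB (l1 l2 : List Char) : Bool :=
  let d := (l1.zip l2).dropWhile (fun p => p.1 == p.2)
  d.isEmpty || (pvCards.contains (d.headD ('A', 'A')).1 && pvCards.contains (d.headD ('A', 'A')).2)

-- the admitted pairs of hands: equal hands A evaluates (both programs answer 0 there), or two
-- acceptable hands whose first differing tie-break pair is in the card table or whose types
-- visibly differ (then the tie-break is never consulted)
def pvPairOK (h1 h2 : List Char) : Bool :=
  (h1 == h2 && pvAOK h1)
    || (pvHandOK h1 && pvHandOK h2
        && (pvTieB h1 h2
            || (match pvPreRank h1, pvPreRank h2 with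
                | some r1, some r2 => r1 != r2
                | _, _ => false)))

-- Pre_ = both items nonempty and the two hands an admitted pair per pvPairOK. This keeps out
-- the inputs where A raises (IndexError/ValueError on short or all-joker joker hands, "?" on
-- bad count shapes, KeyError on a tie-break character outside the card table), joker hands not
-- of the natural 5-card size (above five cards A's substitution search silently ignores every
-- card after the fifth, an accident of its recursion), and ties A resolves through the card
-- table that a closed-form precondition cannot tell apart from a KeyError, so a few inputs on
-- which A still returns are excluded.
def Pre_compare_for_second_part (item1 : List String) (item2 : List String) : Prop :=
  0 < item1.length ∧ 0 < item2.length ∧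
    pvPairOK (item1.getD 0 "").toList (item2.getD 0 "").toList = true

instance (item1 : List String) (item2 : List String) :
    Decidable (Pre_compare_for_second_part item1 item2) := by
  unfold Pre_compare_for_second_part; infer_instance

def pvWitness_compare_for_second_part : List String × List String := (["AKQJT"], ["23456"])

def Spec_compare_for_second_part (item1 : List String) (item2 : List String) (out : Int) : Prop :=
  out = compare_for_second_part_alt item1 item2

instance (item1 : List String) (item2 : List String) (out : Int) :
    Decidable (Spec_compare_for_second_part item1 item2 out) := by
  unfold Spec_compare_for_second_part; infer_instance

-- ===== CLAIM (what is proved, stated in full; the proofs are below) =====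
def Claim_equal_compare_for_second_part : Prop :=
  ∀ (item1 : List String) (item2 : List String), Dom_compare_for_second_part item1 item2 →
    Pre_compare_for_second_part item1 item2 →
    Spec_compare_for_second_part item1 item2 (compare_for_second_part item1 item2)

-- ===== LEMMAS AND PROOFS =====

-- ---- proof-layer definitions ----

-- the multiset of per-distinct-card counts of a hand, as A's Counter produces it
def pvValsOf (h : List Char) : List Int :=
  (PySem.Set.ofList h).map (fun c => (h.count c : Int))

-- all hands obtainable from `cs` by replacing each 'J' with an element of `poss`
def pvSubsts (poss : List Char) : List Char → List (List Char)
  | [] => [[]]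
  | c :: cs =>
    if c = 'J' then poss.flatMap (fun p => (pvSubsts poss cs).map (p :: ·))
    else (pvSubsts poss cs).map (c :: ·)

-- B's value for a joker state: joker count j added to the largest count of cs
def pvTarget (j : Nat) (cs : List Int) : Int :=
  pvB_classify (if j ≠ 0 then
      (match pvB_dsort cs with
       | [] => [(j : Int)]
       | c :: rest => (c + (j : Int)) :: rest)
    else pvB_dsort cs)

-- all length-k lists of nonnegative ints summing to j
def pvComps : Nat → Nat → List (List Int)
  | j, 0 => if j = 0 then [[]] else []
  | j, k + 1 => (List.range (j + 1)).flatMap (fun x => (pvComps (j - x) k).map ((x : Int) :: ·))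

-- every (joker count, distinct-non-joker-count vector) state of a 5-card joker search
def pvStates : List (Nat × List Int) :=
  [(0, [5]), (0, [4, 1]), (0, [1, 4]), (0, [3, 2]), (0, [2, 3]),
   (0, [3, 1, 1]), (0, [1, 3, 1]), (0, [1, 1, 3]),
   (0, [2, 2, 1]), (0, [2, 1, 2]), (0, [1, 2, 2]),
   (0, [2, 1, 1, 1]), (0, [1, 2, 1, 1]), (0, [1, 1, 2, 1]), (0, [1, 1, 1, 2]),
   (0, [1, 1, 1, 1, 1]),
   (1, [4]), (1, [3, 1]), (1, [1, 3]), (1, [2, 2]), (1, [2, 1, 1]), (1, [1, 2, 1]),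
   (1, [1, 1, 2]), (1, [1, 1, 1, 1]), (2, [3]), (2, [2, 1]), (2, [1, 2]), (2, [1, 1, 1]),
   (3, [2]), (3, [1, 1]), (4, [1])]

-- a concrete substituted hand: replace successive 'J's by successive supply elements
def pvFill : List Char → List Char → List Char
  | [], _ => []
  | c :: cs, sup =>
    if c = 'J' then
      match sup with
      | s :: sup' => s :: pvFill cs sup'
      | [] => pvFill cs []
    else c :: pvFill cs sup

def pvSupply : List Char → List Int → List Char
  | c :: S, n :: a => List.replicate n.toNat c ++ pvSupply S a
  | _, _ => []

-- A's get_value_card, rewritten as a function of the count multiset alone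
def pvG (ws : List Int) : Option Int :=
  if ws.length = 1 then some 7
  else if ws.length = 2 then
    (if ws.contains 3 && ws.contains 2 then some 5
     else if ws.contains 4 then some 6
     else none)
  else
    let step : Option Int :=
      if ws.length = 3 then
        if ws.contains 3 then some 4
        else if (0 : Int) + (ws.count 2 : Int) = 2 then some 3 else none
      else none
    match step with
    | some v => some v
    | none => if ws.contains 2 then some 2 else some 1

-- ---- small generic lemmas ----

theorem pv_mapM_some {α β : Type} (f : α → Option β) (g : α → β) :
    ∀ (l : List α), (∀ x ∈ l, f x = some (g x)) → l.mapM f = some (l.map g) := by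
  intro l
  induction l with
  | nil => intro _; rfl
  | cons x xs ih =>
    intro hx
    rw [List.mapM_cons, hx x (by simp), ih (fun y hy => hx y (by simp [hy]))]
    rfl

theorem pv_zipWith_map {α : Type} (f g : α → Int) (l : List α) :
    List.zipWith (· + ·) (l.map f) (l.map g) = l.map (fun x => f x + g x) := by
  induction l with
  | nil => rfl
  | cons x xs ih => simp [ih]

theorem pv_length_le_sum (l : List Int) (h1 : ∀ x ∈ l, 1 ≤ x) : (l.length : Int) ≤ l.sum := by
  induction l with
  | nil => simp
  | cons x xs ih =>
    have := h1 x (by simp)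
    have := ih (fun y hy => h1 y (by simp [hy]))
    simp only [List.length_cons, List.sum_cons]
    push_cast
    omega

theorem pv_sum_map_sub (S : List Char) (f g : Char → Int) :
    (S.map (fun c => f c - g c)).sum = (S.map f).sum - (S.map g).sum := by
  induction S with
  | nil => simp
  | cons c S ih => simp [ih]; ring

-- sum of the counts over a nodup list covering exactly the elements of t is t's length
theorem pv_sum_counts (S : List Char) (t : List Char) (hnd : S.Nodup)
    (h1 : ∀ x ∈ t, x ∈ S) (h2 : ∀ c ∈ S, c ∈ t) :
    (S.map (fun c => (t.count c : Int))).sum = t.length := by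
  have hperm : S.Perm t.dedup := by
    refine (List.perm_ext_iff_of_nodup hnd t.nodup_dedup).mpr (fun a => ?_)
    rw [List.mem_dedup]
    exact ⟨fun ha => h2 a ha, fun ha => h1 a ha⟩
  rw [(hperm.map (fun c => (t.count c : Int))).sum_eq]
  have : (t.dedup.map fun c => (t.count c : Int)) = (t.dedup.map fun c => t.count c).map (fun n : Nat => (n : Int)) := by
    simp [List.map_map, Function.comp]
  rw [this, ← Nat.cast_list_sum, List.sum_map_count_dedup_eq_length]

-- ---- dsort: canonical under permutation ----

theorem pv_insertBy_pairwise (x : Int) (ys : List Int)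
    (h : ys.Pairwise (fun a b => b ≤ a)) :
    (PySem.List.insertBy (fun a b => decide (b < a)) x ys).Pairwise (fun a b => b ≤ a) := by
  induction ys with
  | nil => simp [PySem.List.insertBy]
  | cons y ys ih =>
    rcases List.pairwise_cons.mp h with ⟨hy, hys⟩
    rw [show PySem.List.insertBy (fun a b => decide (b < a)) x (y :: ys)
        = if y < x then x :: y :: ys else y :: PySem.List.insertBy (fun a b => decide (b < a)) x ys
      from by simp [PySem.List.insertBy]]
    split_ifs with hlt
    · refine List.pairwise_cons.mpr ⟨?_, h⟩
      intro b hb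
      rcases List.mem_cons.mp hb with rfl | hb'
      · omega
      · have := hy b hb'; omega
    · refine List.pairwise_cons.mpr ⟨?_, ih hys⟩
      intro b hb
      rw [PySem.List.mem_insertBy] at hb
      rcases hb with rfl | hb'
      · omega
      · exact hy b hb'

theorem pv_foldl_insertBy_pairwise (l : List Int) :
    ∀ acc : List Int, acc.Pairwise (fun a b => b ≤ a) →
      (l.foldl (fun acc x => PySem.List.insertBy (fun a b => decide (b < a)) x acc) acc).Pairwise
        (fun a b => b ≤ a) := by
  induction l with
  | nil => intro acc h; exact h
  | cons x xs ih => intro acc h; exact ih _ (pv_insertBy_pairwise x acc h)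

theorem pv_dsort_pairwise (l : List Int) : (pvB_dsort l).Pairwise (fun a b => b ≤ a) := by
  rw [pvB_dsort, PySem.List.sorted_rev_eq_foldl_insertBy]
  exact pv_foldl_insertBy_pairwise l [] (by simp)

theorem pv_dsort_congr {l l' : List Int} (h : l.Perm l') : pvB_dsort l = pvB_dsort l' := by
  refine List.Perm.eq_of_pairwise ?_ (pv_dsort_pairwise l) (pv_dsort_pairwise l') ?_
  · intro a b _ _ h1 h2; omega
  · exact ((PySem.List.sorted_perm l _ true).trans h).trans
      (PySem.List.sorted_perm l' _ true).symm

-- ---- A's get_value_card vs B's classify ----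

theorem pv_gvc_eq_G (h : List Char) : pvA_get_value_card h = pvG (pvValsOf h) := by
  have hitems := PySem.Dict.items_counter h
  have hvals : PySem.Dict.values (PySem.Dict.counter h) = pvValsOf h := by
    simp [PySem.Dict.values, hitems, List.map_map, pvValsOf, Function.comp]
  have hsize : PySem.Dict.size (PySem.Dict.counter h) = (pvValsOf h).length := by
    simp [PySem.Dict.size, hitems, pvValsOf]
  have hcount : List.countP (fun k => (h.count k : Int) == 2) (PySem.Set.ofList h)
      = (pvValsOf h).count 2 := by
    rw [pvValsOf, List.count, List.countP_map]
    rfl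
  have hfold : (PySem.Dict.items (PySem.Dict.counter h)).foldl
      (fun s p => if p.2 == (2 : Int) then s + 1 else s) (0 : Int)
      = (0 : Int) + ((pvValsOf h).count 2 : Int) := by
    rw [hitems, List.foldl_map]
    rw [show (fun (x : Int) (y : Char) =>
          if ((y, (List.count y h : Int)) : Char × Int).2 == 2 then x + 1 else x)
        = (fun (x : Int) (y : Char) =>
          if (fun k => (List.count k h : Int) == 2) y then x + 1 else x) from rfl]
    rw [PySem.List.foldl_if_add_one, hcount]
  simp only [pvA_get_value_card, pvG, hvals, hsize, hfold]

theorem pv_classify_perm {vs ws : List Int} (hperm : vs.Perm ws) :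
    pvB_classify vs = pvB_classify ws := by
  simp only [pvB_classify, List.contains_eq_mem, hperm.length_eq, hperm.count_eq 2,
    hperm.mem_iff]

-- where A's get_value_card returns, it computes B's classify
theorem pv_G_classify (ws : List Int)
    (hsafe : ¬ ws.length = 2 ∨ ((3 : Int) ∈ ws ∧ (2 : Int) ∈ ws) ∨ (4 : Int) ∈ ws) :
    pvG ws = some (pvB_classify ws) := by
  simp only [pvG, pvB_classify, List.contains_eq_mem, zero_add]
  by_cases h1 : ws.length = 1
  · simp [h1]
  · rw [if_neg h1, if_neg h1]
    by_cases h2 : ws.length = 2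
    · rcases hsafe with h | h | h
      · exact absurd h2 h
      · simp [h2, h.1, h.2]
      · by_cases h32 : (3 : Int) ∈ ws ∧ (2 : Int) ∈ ws
        · simp [h2, h32.1, h32.2]
        · have hnot : (decide ((3 : Int) ∈ ws) && decide ((2 : Int) ∈ ws)) = false := by
            rcases not_and_or.mp h32 with h' | h' <;> simp [h']
          simp [h2, hnot, h]
    · rw [if_neg h2, if_neg h2]
      by_cases h3 : ws.length = 3
      · by_cases h33 : (3 : Int) ∈ ws
        · simp [h3, h33]
        · by_cases hcc : ws.count 2 = 2
          · simp [h3, h33, hcc]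
          · have hccI : ¬ ((ws.count 2 : Nat) : Int) = 2 := by exact_mod_cast hcc
            by_cases hm : (2 : Int) ∈ ws <;> simp [h3, h33, hcc, hccI, hm]
      · by_cases hm : (2 : Int) ∈ ws <;> simp [h3, hm]

-- a 2-part multiset of positive counts summing to 5 is {4,1} or {3,2}
theorem pv_two_sum5 (ws : List Int) (hlen : ws.length = 2) (h1 : ∀ x ∈ ws, 1 ≤ x)
    (hs : ws.sum = 5) : ((3 : Int) ∈ ws ∧ (2 : Int) ∈ ws) ∨ (4 : Int) ∈ ws := by
  rcases ws with _ | ⟨a, _ | ⟨b, _ | ⟨c, t⟩⟩⟩ <;> simp_all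
  omega

-- ---- substitutions ----

theorem pv_combos_eq (hand poss : List Char) (h5 : 5 ≤ hand.length) :
    ∀ (n k : Nat), k + n = 5 → ∀ (pre : List Char),
      pvA_get_hand_combinations pre k hand poss =
        some ((pvSubsts poss ((hand.take 5).drop k)).map (pre ++ ·)) := by
  intro n
  induction n with
  | zero =>
    intro k hk pre
    have hk5 : k = 5 := by omega
    subst hk5
    have hlt : (hand.take 5).length = 5 := by rw [List.length_take]; omega
    have hnil : (hand.take 5).drop 5 = [] := by
      rw [List.drop_eq_nil_iff]
      omega
    rw [pvA_get_hand_combinations, if_pos rfl, hnil]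
    rw [show pvSubsts poss [] = [[]] from rfl]
    simp
  | succ n ih =>
    intro k hk pre
    have hk5 : ¬ k = 5 := by omega
    have hklt : k < hand.length := by omega
    have hget : hand[k]? = some hand[k] := List.getElem?_eq_getElem hklt
    have h1 : k < (hand.take 5).length := by rw [List.length_take]; omega
    have hdrop : (hand.take 5).drop k = hand[k] :: (hand.take 5).drop (k + 1) := by
      have h2 := (List.getElem_cons_drop h1).symm
      rwa [show (hand.take 5)[k]'h1 = hand[k] by simp [List.getElem_take]] at h2
    rw [pvA_get_hand_combinations, if_neg hk5]
    split
    next heq =>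
      rw [hget] at heq
      simp at heq
    next c heq =>
      rw [hget] at heq
      injection heq with hceq
      subst hceq
      rw [hdrop]
      by_cases hc : hand[k] = 'J'
      · rw [if_pos hc, hc]
        rw [pv_mapM_some _ (fun p => (pvSubsts poss ((hand.take 5).drop (k + 1))).map ((pre ++ [p]) ++ ·)) poss
          (fun p _ => ih (k + 1) (by omega) (pre ++ [p]))]
        simp only [Option.map_some]
        congr 1
        rw [show pvSubsts poss ('J' :: (hand.take 5).drop (k + 1))
            = poss.flatMap (fun p => (pvSubsts poss ((hand.take 5).drop (k + 1))).map (p :: ·)) from by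
          simp [pvSubsts]]
        rw [List.map_flatMap, List.flatMap_def]
        congr 1
        refine List.map_congr_left (fun p _ => ?_)
        simp [List.map_map, Function.comp]
      · rw [if_neg hc]
        rw [ih (k + 1) (by omega) (pre ++ [hand[k]])]
        congr 1
        rw [show pvSubsts poss (hand[k] :: (hand.take 5).drop (k + 1))
            = (pvSubsts poss ((hand.take 5).drop (k + 1))).map (hand[k] :: ·) from by simp [pvSubsts, hc]]
        simp [List.map_map, Function.comp]

theorem pv_substs_length (poss : List Char) :
    ∀ (cs t : List Char), t ∈ pvSubsts poss cs → t.length = cs.length := by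
  intro cs
  induction cs with
  | nil => intro t ht; simp [pvSubsts] at ht; simp [ht]
  | cons c cs ih =>
    intro t ht
    simp only [pvSubsts] at ht
    split_ifs at ht with hc
    · simp only [List.mem_flatMap, List.mem_map] at ht
      obtain ⟨p, _, t', ht', rfl⟩ := ht
      simp [ih t' ht']
    · simp only [List.mem_map] at ht
      obtain ⟨t', ht', rfl⟩ := ht
      simp [ih t' ht']

theorem pv_substs_count_le (poss : List Char) (_hq : ∀ p ∈ poss, p ≠ 'J') :
    ∀ (cs t : List Char), t ∈ pvSubsts poss cs → ∀ c : Char, c ≠ 'J' →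
      cs.count c ≤ t.count c := by
  intro cs
  induction cs with
  | nil => intro t ht c _; simp [pvSubsts] at ht; simp [ht]
  | cons x cs ih =>
    intro t ht c hc
    simp only [pvSubsts] at ht
    split_ifs at ht with hx
    · simp only [List.mem_flatMap, List.mem_map] at ht
      obtain ⟨p, _, t', ht', rfl⟩ := ht
      have h1 := ih t' ht' c hc
      subst hx
      simp only [List.count_cons]
      have h2 : ('J' == c) = false := by
        simp only [beq_eq_false_iff_ne, ne_eq]
        exact fun e => hc e.symm
      rw [h2]
      simp only [Bool.false_eq_true, if_false]
      split <;> omega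
    · simp only [List.mem_map] at ht
      obtain ⟨t', ht', rfl⟩ := ht
      have := ih t' ht' c hc
      simp only [List.count_cons]
      omega

theorem pv_substs_mem_poss (poss : List Char) (_hq : ∀ c ∈ poss, c ≠ 'J') :
    ∀ (cs t : List Char), (∀ c ∈ cs, c ≠ 'J' → c ∈ poss) → t ∈ pvSubsts poss cs →
      ∀ x ∈ t, x ∈ poss := by
  intro cs
  induction cs with
  | nil => intro t _ ht x hx; simp [pvSubsts] at ht; subst ht; simp at hx
  | cons c cs ih =>
    intro t hcs ht x hx
    simp only [pvSubsts] at ht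
    split_ifs at ht with hc
    · simp only [List.mem_flatMap, List.mem_map] at ht
      obtain ⟨p, hp, t', ht', rfl⟩ := ht
      rcases List.mem_cons.mp hx with rfl | hx'
      · exact hp
      · exact ih t' (fun d hd => hcs d (by simp [hd])) ht' x hx'
    · simp only [List.mem_map] at ht
      obtain ⟨t', ht', rfl⟩ := ht
      rcases List.mem_cons.mp hx with rfl | hx'
      · exact hcs x (by simp) hc
      · exact ih t' (fun d hd => hcs d (by simp [hd])) ht' x hx'

-- ---- compositions ----

theorem pv_comps_sound (j k : Nat) :
    ∀ a ∈ pvComps j k, a.length = k ∧ (∀ x ∈ a, 0 ≤ x) ∧ a.sum = (j : Int) := by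
  induction k generalizing j with
  | zero =>
    intro a ha
    simp only [pvComps] at ha
    split_ifs at ha with hj
    · simp at ha; subst ha; subst hj; simp
    · simp at ha
  | succ k ih =>
    intro a ha
    simp only [pvComps, List.mem_flatMap, List.mem_map, List.mem_range] at ha
    obtain ⟨x, hx, b, hb, rfl⟩ := ha
    obtain ⟨hlen, hpos, hsum⟩ := ih (j - x) b hb
    refine ⟨by simp [hlen], ?_, ?_⟩
    · intro y hy
      rcases List.mem_cons.mp hy with rfl | hy'
      · positivity
      · exact hpos y hy'
    · simp only [List.sum_cons, hsum]
      omega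

theorem pv_comps_complete (a : List Int) :
    ∀ (j k : Nat), a.length = k → (∀ x ∈ a, 0 ≤ x) → a.sum = (j : Int) → a ∈ pvComps j k := by
  induction a with
  | nil =>
    intro j k hl _ hs
    simp only [List.length_nil] at hl
    subst hl
    have hj : j = 0 := by simp at hs; omega
    subst hj
    simp [pvComps]
  | cons x a ih =>
    intro j k hl h0 hs
    simp only [List.length_cons] at hl
    subst hl
    have hx0 : 0 ≤ x := h0 x (by simp)
    have hrest : 0 ≤ a.sum := List.sum_nonneg (fun y hy => h0 y (by simp [hy]))
    have hsx : x + a.sum = (j : Int) := by simpa using hs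
    simp only [pvComps, List.mem_flatMap, List.mem_map, List.mem_range]
    refine ⟨x.toNat, by omega, a, ?_, ?_⟩
    · exact ih (j - x.toNat) a.length rfl (fun y hy => h0 y (by simp [hy])) (by omega)
    · rw [Int.toNat_of_nonneg hx0]

theorem pv_states_complete (j : Nat) (cs : List Int) (hj4 : j ≤ 4)
    (h1 : ∀ x ∈ cs, 1 ≤ x) (hs : cs.sum = 5 - (j : Int)) : (j, cs) ∈ pvStates := by
  have hlen : (cs.length : Int) ≤ 5 - (j : Int) := by
    have := pv_length_le_sum cs h1; omega
  rcases cs with _ | ⟨a, _ | ⟨b, _ | ⟨c, _ | ⟨d, _ | ⟨e, rest⟩⟩⟩⟩⟩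
  · simp at hs; omega
  · simp only [List.sum_cons, List.sum_nil, add_zero] at hs
    have ha := h1 a (by simp)
    have haU : a ≤ 5 := by omega
    interval_cases j <;> interval_cases a <;> first | decide | omega
  · simp only [List.sum_cons, List.sum_nil, add_zero] at hs
    have ha := h1 a (by simp); have hb := h1 b (by simp)
    have haU : a ≤ 4 := by omega
    have hbU : b ≤ 4 := by omega
    interval_cases j <;> interval_cases a <;> interval_cases b <;> first | decide | omega
  · simp only [List.sum_cons, List.sum_nil, add_zero] at hs
    have ha := h1 a (by simp); have hb := h1 b (by simp); have hc := h1 c (by simp)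
    have haU : a ≤ 3 := by omega
    have hbU : b ≤ 3 := by omega
    have hcU : c ≤ 3 := by omega
    interval_cases j <;> interval_cases a <;> interval_cases b <;> interval_cases c <;>
      first | decide | omega
  · simp only [List.sum_cons, List.sum_nil, add_zero] at hs
    have ha := h1 a (by simp); have hb := h1 b (by simp); have hc := h1 c (by simp)
    have hd := h1 d (by simp)
    have haU : a ≤ 2 := by omega
    have hbU : b ≤ 2 := by omega
    have hcU : c ≤ 2 := by omega
    have hdU : d ≤ 2 := by omega
    interval_cases j <;> interval_cases a <;> interval_cases b <;> interval_cases c <;>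
      interval_cases d <;> first | decide | omega
  · have hrest : rest = [] := by
      have ha := h1 a (by simp); have hb := h1 b (by simp); have hc := h1 c (by simp)
      have hd := h1 d (by simp); have he := h1 e (by simp)
      simp only [List.length_cons] at hlen
      have : rest.length = 0 := by push_cast at hlen; omega
      exact List.length_eq_zero_iff.mp this
    subst hrest
    simp only [List.sum_cons, List.sum_nil, add_zero] at hs
    have ha := h1 a (by simp); have hb := h1 b (by simp); have hc := h1 c (by simp)
    have hd := h1 d (by simp); have he := h1 e (by simp)
    have haU : a ≤ 1 := by omega
    have hbU : b ≤ 1 := by omega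
    have hcU : c ≤ 1 := by omega
    have hdU : d ≤ 1 := by omega
    have heU : e ≤ 1 := by omega
    interval_cases j <;> interval_cases a <;> interval_cases b <;> interval_cases c <;>
      interval_cases d <;> interval_cases e <;> first | decide | omega

-- the finite core: over every reachable state, every joker distribution (including ones that
-- open up to j fresh cards) scores at most the all-jokers-to-the-biggest-count bump, and some
-- distribution over the existing cards attains it
theorem pv_key_dec :
    (pvStates.all (fun st =>
      ((pvComps st.1 (st.2.length + st.1)).all fun a =>
        decide (pvB_classify (pvB_dsort
            ((List.zipWith (· + ·) (st.2 ++ List.replicate st.1 0) a).filter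
              (fun x => decide (0 < x)))) ≤ pvTarget st.1 st.2)) &&
      ((pvComps st.1 st.2.length).any fun a =>
        pvB_classify (pvB_dsort
            ((List.zipWith (· + ·) st.2 a).filter (fun x => decide (0 < x))))
          == pvTarget st.1 st.2))) = true := by
  decide

-- ---- fill / supply ----

theorem pv_supply_elems (S : List Char) :
    ∀ (a : List Int), ∀ x ∈ pvSupply S a, x ∈ S := by
  induction S with
  | nil => intro a x hx; simp [pvSupply] at hx
  | cons c S ih =>
    intro a x hx
    cases a with
    | nil => simp [pvSupply] at hx
    | cons n a =>
      simp only [pvSupply, List.mem_append] at hx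
      rcases hx with hx | hx
      · simp [List.eq_of_mem_replicate hx]
      · exact List.mem_cons_of_mem c (ih a x hx)

theorem pv_supply_length (S : List Char) :
    ∀ (a : List Int), (∀ x ∈ a, 0 ≤ x) → a.length = S.length →
      ((pvSupply S a).length : Int) = a.sum := by
  induction S with
  | nil =>
    intro a _ hl
    simp only [List.length_nil] at hl
    rw [List.length_eq_zero_iff.mp hl]
    simp [pvSupply]
  | cons c S ih =>
    intro a h0 hl
    cases a with
    | nil => simp at hl
    | cons n a =>
      have hn : 0 ≤ n := h0 n (by simp)
      have := ih a (fun y hy => h0 y (by simp [hy])) (by simpa using hl)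
      simp only [pvSupply, List.length_append, List.length_replicate, List.sum_cons]
      push_cast
      omega

theorem pv_supply_count (S : List Char) :
    ∀ (a : List Int), S.Nodup → a.length = S.length → (∀ x ∈ a, 0 ≤ x) →
      S.map (fun c => ((pvSupply S a).count c : Int)) = a := by
  induction S with
  | nil =>
    intro a _ hl _
    simp only [List.length_nil] at hl
    rw [List.length_eq_zero_iff.mp hl]
    simp
  | cons c S ih =>
    intro a hnd hl h0
    cases a with
    | nil => simp at hl
    | cons n a =>
      have hcS : c ∉ S := (List.nodup_cons.mp hnd).1
      have hndS : S.Nodup := (List.nodup_cons.mp hnd).2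
      have hn : 0 ≤ n := h0 n (by simp)
      simp only [pvSupply, List.map_cons, List.cons.injEq]
      constructor
      · have hnot : c ∉ pvSupply S a := fun hmem => hcS (pv_supply_elems S a c hmem)
        rw [List.count_append, List.count_replicate_self, List.count_eq_zero.mpr hnot]
        omega
      · have : ∀ c' ∈ S, ((List.replicate n.toNat c ++ pvSupply S a).count c' : Int)
            = ((pvSupply S a).count c' : Int) := by
          intro c' hc'
          have hne : c ≠ c' := fun e => hcS (e ▸ hc')
          rw [List.count_append, List.count_replicate]
          simp [hne]
        rw [List.map_congr_left this]
        exact ih a hndS (by simpa using hl) (fun y hy => h0 y (by simp [hy]))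

theorem pv_fill_mem_substs (poss : List Char) :
    ∀ (cs sup : List Char), (∀ x ∈ sup, x ∈ poss) → sup.length = cs.count 'J' →
      pvFill cs sup ∈ pvSubsts poss cs := by
  intro cs
  induction cs with
  | nil => intro sup _ _; simp [pvFill, pvSubsts]
  | cons c cs ih =>
    intro sup hel hlen
    by_cases hc : c = 'J'
    · subst hc
      rw [List.count_cons_self] at hlen
      cases sup with
      | nil => simp at hlen
      | cons s sup' =>
        have hstep : pvFill ('J' :: cs) (s :: sup') = s :: pvFill cs sup' := by simp [pvFill]
        have hsub : pvSubsts poss ('J' :: cs)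
            = poss.flatMap (fun p => (pvSubsts poss cs).map (p :: ·)) := by simp [pvSubsts]
        rw [hstep, hsub, List.mem_flatMap]
        exact ⟨s, hel s (by simp),
          List.mem_map_of_mem (ih sup' (fun x hx => hel x (by simp [hx]))
            (by simp only [List.length_cons] at hlen; omega))⟩
    · have hlen' : sup.length = cs.count 'J' := by
        rwa [List.count_cons_of_ne (a := 'J') (b := c) hc] at hlen
      have hstep : pvFill (c :: cs) sup = c :: pvFill cs sup := by simp [pvFill, hc]
      have hsub : pvSubsts poss (c :: cs) = (pvSubsts poss cs).map (c :: ·) := by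
        simp [pvSubsts, hc]
      rw [hstep, hsub]
      exact List.mem_map_of_mem (ih sup hel hlen')

theorem pv_fill_count (cs : List Char) :
    ∀ (sup : List Char), sup.length = cs.count 'J' → ∀ c : Char, c ≠ 'J' →
      (pvFill cs sup).count c = (cs.filter (fun x => x ≠ 'J')).count c + sup.count c := by
  induction cs with
  | nil =>
    intro sup hlen c _
    simp only [List.count_nil] at hlen
    rw [List.length_eq_zero_iff.mp hlen]
    simp [pvFill]
  | cons x cs ih =>
    intro sup hlen c hc
    by_cases hx : x = 'J'
    · subst hx
      rw [List.count_cons_self] at hlen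
      cases sup with
      | nil => simp at hlen
      | cons s sup' =>
        have hstep : pvFill ('J' :: cs) (s :: sup') = s :: pvFill cs sup' := by simp [pvFill]
        have hfil : List.filter (fun y => decide ¬y = 'J') ('J' :: cs)
            = List.filter (fun y => decide ¬y = 'J') cs := by simp
        rw [hstep]
        simp only [ne_eq, hfil, List.count_cons]
        rw [ih sup' (by simp only [List.length_cons] at hlen; omega) c hc]
        simp only [ne_eq]
        omega
    · have hlen' : sup.length = cs.count 'J' := by
        rwa [List.count_cons_of_ne (a := 'J') (b := x) hx] at hlen
      have hstep : pvFill (x :: cs) sup = x :: pvFill cs sup := by simp [pvFill, hx]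
      have hfil : List.filter (fun y => decide ¬y = 'J') (x :: cs)
          = x :: List.filter (fun y => decide ¬y = 'J') cs := by simp [hx]
      rw [hstep]
      simp only [ne_eq, hfil, List.count_cons]
      rw [ih sup hlen' c hc]
      simp only [ne_eq]
      omega

-- ---- max? characterization ----

theorem pv_max_eq (l : List Int) (v : Int) (hv : v ∈ l) (hb : ∀ w ∈ l, w ≤ v) :
    PySem.List.max? l (fun x => x) = some v := by
  cases hm : PySem.List.max? l (fun x => x) with
  | none =>
    rw [PySem.List.max?_eq_none_iff] at hm
    subst hm; simp at hv
  | some m =>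
    have h1 : m ≤ v := hb m (PySem.List.max?_mem hm)
    have h2 : v ≤ m := PySem.List.max?_isMax hm v hv
    rw [le_antisymm h1 h2]

theorem pv_filter_length_count (l : List Char) :
    (l.filter (fun c => c ≠ 'J')).length + l.count 'J' = l.length := by
  induction l with
  | nil => rfl
  | cons x t ih =>
    simp only [List.filter_cons, List.count_cons, List.length_cons]
    by_cases hx : x = 'J' <;> simp [hx] at ih ⊢ <;> omega

-- ---- auxiliary facts for the joker search ----

-- zipWith (+) against zeros is the identity
theorem pv_zip_zero (l : List Int) :
    List.zipWith (· + ·) (List.replicate l.length (0 : Int)) l = l := by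
  induction l with
  | nil => rfl
  | cons x xs ih => simp [List.replicate_succ, ih]

-- a 5-card hand's count multiset never hits A's raise branch
theorem pv_valsOf_safe (t : List Char) (h5 : t.length = 5) :
    ¬ (pvValsOf t).length = 2 ∨ ((3 : Int) ∈ pvValsOf t ∧ (2 : Int) ∈ pvValsOf t) ∨
      (4 : Int) ∈ pvValsOf t := by
  by_cases hl : (pvValsOf t).length = 2
  · right
    refine pv_two_sum5 _ hl ?_ ?_
    · intro x hx
      rw [pvValsOf, List.mem_map] at hx
      obtain ⟨c, hc, rfl⟩ := hx
      have : 0 < t.count c := List.count_pos_iff.mpr ((PySem.Set.mem_ofList t c).mp hc)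
      omega
    · rw [pvValsOf, pv_sum_counts (PySem.Set.ofList t) t (PySem.Set.nodup_ofList t)
        (fun x hx => (PySem.Set.mem_ofList t x).mpr hx)
        (fun c hc => (PySem.Set.mem_ofList t c).mp hc), h5]
      simp
  · left; exact hl

theorem pv_gvc_combo (t : List Char) (h5 : t.length = 5) :
    pvA_get_value_card t = some (pvB_classify (pvValsOf t)) := by
  rw [pv_gvc_eq_G, pv_G_classify _ (pv_valsOf_safe t h5)]

-- B's strength is the joker target of its own joker count and non-joker count vector
theorem pv_strength_eq_target (h : List Char) :
    pvB_strength h = pvTarget (h.count 'J')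
      (((PySem.Set.ofList h).filter (fun c => c ≠ 'J')).map (fun c => (h.count c : Int))) := rfl

-- with no jokers the target is plain classification
theorem pv_target_zero (vs : List Int) : pvTarget 0 vs = pvB_classify vs := by
  unfold pvTarget
  rw [if_neg (by simp)]
  exact pv_classify_perm (PySem.List.sorted_perm vs (fun x => x) true)

-- B's strength of a joker-free hand is the plain classification of its count multiset
theorem pv_strength_noJ (h : List Char) (hJ : ¬ h.contains 'J' = true) :
    pvB_strength h = pvB_classify (pvValsOf h) := by
  have hnoJ : 'J' ∉ h := by simpa [List.contains_eq_mem] using hJ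
  have hcnt0 : h.count 'J' = 0 := List.count_eq_zero.mpr hnoJ
  have hfil : (PySem.Set.ofList h).filter (fun c => c ≠ 'J') = PySem.Set.ofList h :=
    List.filter_eq_self.mpr (fun c hc => by
      have hch : c ∈ h := (PySem.Set.mem_ofList h c).mp hc
      simp only [ne_eq, decide_eq_true_eq]
      rintro rfl
      exact hnoJ hch)
  rw [pv_strength_eq_target, hcnt0, hfil]
  rw [show (PySem.Set.ofList h).map (fun c => (h.count c : Int)) = pvValsOf h from rfl]
  rw [pv_target_zero (pvValsOf h)]

-- where pvPreRank is determined it is B's strength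
theorem pv_rank_strength (h : List Char) (r : Int) (hr : pvPreRank h = some r) :
    pvB_strength h = r := by
  rw [pvPreRank] at hr
  by_cases hAllJ : h = ['J', 'J', 'J', 'J', 'J']
  · subst hAllJ
    rw [if_pos rfl] at hr
    cases hr
    decide
  · rw [if_neg hAllJ] at hr
    by_cases hJ : h.contains 'J' = true
    · rw [if_pos hJ] at hr
      exact absurd hr (by simp)
    · rw [if_neg hJ] at hr
      injection hr with hr
      rw [pv_strength_noJ h hJ]
      exact hr

-- both tie-break loops answer 0 on a hand zipped with itself
theorem pv_tieA_self (l : List Char) : pvA_tie_loop (l.zip l) = some 0 := by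
  induction l with
  | nil => rfl
  | cons a l ih =>
    rw [List.zip_cons_cons]
    rw [show pvA_tie_loop ((a, a) :: l.zip l)
        = if a = a then pvA_tie_loop (l.zip l) else _ from rfl, if_pos rfl]
    exact ih

theorem pv_tieB_self (l : List Char) : pvB_tie_loop (l.zip l) = some 0 := by
  induction l with
  | nil => rfl
  | cons a l ih =>
    rw [List.zip_cons_cons]
    rw [show pvB_tie_loop ((a, a) :: l.zip l)
        = if a = a then pvB_tie_loop (l.zip l) else _ from rfl, if_pos rfl]
    exact ih

-- ---- the main hand-value lemma: on an acceptable hand, A's brute-force joker maximum is B's strength ----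

theorem pv_main_hand (h : List Char) (hok : pvHandOK h = true) :
    pvA_get_value_card_with_jokers h = some (pvB_strength h) := by
  by_cases hJ : h.contains 'J' = true
  case neg =>
    rw [pvHandOK, if_neg hJ, pvShapeOK] at hok
    have hsafe : ¬ (pvValsOf h).length = 2 ∨
        ((3 : Int) ∈ pvValsOf h ∧ (2 : Int) ∈ pvValsOf h) ∨ (4 : Int) ∈ pvValsOf h := by
      have h2 := hok
      rw [show ((PySem.Set.ofList h).map (fun c => (h.count c : Int))) = pvValsOf h from rfl] at h2
      simp only [Bool.or_eq_true, Bool.not_eq_true', beq_eq_false_iff_ne, ne_eq,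
        Bool.and_eq_true, List.contains_eq_mem, decide_eq_true_eq] at h2
      rcases h2 with (h' | h') | h'
      · exact Or.inl h'
      · exact Or.inr (Or.inl h')
      · exact Or.inr (Or.inr h')
    have hnoJ : 'J' ∉ h := by simpa [List.contains_eq_mem] using hJ
    have hcnt0 : h.count 'J' = 0 := List.count_eq_zero.mpr hnoJ
    have hfil : (PySem.Set.ofList h).filter (fun c => c ≠ 'J') = PySem.Set.ofList h :=
      List.filter_eq_self.mpr (fun c hc => by
        have hch : c ∈ h := (PySem.Set.mem_ofList h c).mp hc
        simp only [ne_eq, decide_eq_true_eq]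
        rintro rfl
        exact hnoJ hch)
    rw [pvA_get_value_card_with_jokers, if_pos hJ, pv_gvc_eq_G, pv_G_classify _ hsafe,
      pv_strength_eq_target, hcnt0, hfil]
    rw [show (PySem.Set.ofList h).map (fun c => (h.count c : Int)) = pvValsOf h from rfl]
    rw [pv_target_zero (pvValsOf h)]
  case pos =>
    have h5 : h.length = 5 := by
      rw [pvHandOK, if_pos hJ] at hok
      simpa using hok
    by_cases hAllJ : h = ['J', 'J', 'J', 'J', 'J']
    · subst hAllJ; decide
    · rw [pvA_get_value_card_with_jokers, if_neg (not_not_intro hJ), if_neg hAllJ]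
      have hc0 : ∃ c ∈ h, c ≠ 'J' := by
        by_contra hno
        push Not at hno
        exact hAllJ ((List.eq_replicate_iff.mpr ⟨h5, hno⟩).trans rfl)
      obtain ⟨c0, hc0h, hc0J⟩ := hc0
      set S : List Char := PySem.Set.ofList (h.filter (fun c => c ≠ 'J')) with hS
      have hSnd : S.Nodup := PySem.Set.nodup_ofList _
      have hSmem : ∀ c, c ∈ S ↔ (c ∈ h ∧ c ≠ 'J') := by
        intro c
        rw [hS, PySem.Set.mem_ofList, List.mem_filter]
        simp
      have hSJ : ∀ c ∈ S, c ≠ 'J' := fun c hc => ((hSmem c).mp hc).2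
      have hposs : ∀ c ∈ h, c ≠ 'J' → c ∈ S := fun c hc hne => (hSmem c).mpr ⟨hc, hne⟩
      have htake : h.take 5 = h := List.take_of_length_le (le_of_eq h5)
      have hcombos := pv_combos_eq h S (by omega) 5 0 rfl []
      simp only [List.drop_zero, List.nil_append, List.map_id', htake] at hcombos
      set L := pvSubsts S h with hL
      set g : List Char → Int := fun t => pvB_classify (pvValsOf t) with hg
      have hLlen : ∀ t ∈ L, t.length = 5 := fun t ht => (pv_substs_length S h t ht).trans h5
      have hmapM : L.mapM pvA_get_value_card = some (L.map g) :=
        pv_mapM_some _ g L (fun t ht => pv_gvc_combo t (hLlen t ht))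
      simp only [hcombos, hmapM]
      set j := h.count 'J' with hj
      set cnt5 : Char → Int := fun c => (h.count c : Int) with hcnt5
      set cs := S.map cnt5 with hcs
      have hfilmem : ∀ x, x ∈ h.filter (fun c => c ≠ 'J') ↔ x ∈ S := fun x =>
        ⟨fun hx => (hS ▸ (PySem.Set.mem_ofList _ x).mpr hx),
         fun hx => (PySem.Set.mem_ofList _ x).mp (hS ▸ hx)⟩
      have hfil5 : ∀ c ∈ S, (h.filter (fun x => x ≠ 'J')).count c = h.count c :=
        fun c hc => List.count_filter (by simpa using hSJ c hc)
      have hstrength : pvB_strength h = pvTarget j cs := by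
        rw [pv_strength_eq_target, ← hj]
        have hTperm : ((PySem.Set.ofList h).filter (fun c => c ≠ 'J')).Perm S := by
          refine (List.perm_ext_iff_of_nodup
            ((PySem.Set.nodup_ofList h).filter _) hSnd).mpr (fun x => ?_)
          rw [List.mem_filter, PySem.Set.mem_ofList, hSmem]
          simp
        unfold pvTarget
        rw [pv_dsort_congr (hTperm.map cnt5), ← hcs]
      rw [hstrength]
      have hmemS : ∀ t ∈ L, ∀ x ∈ t, x ∈ S :=
        fun t ht => pv_substs_mem_poss S hSJ h t hposs ht
      have htJ : ∀ t ∈ L, ∀ x ∈ t, x ≠ 'J' := fun t ht x hx => hSJ x (hmemS t ht x hx)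
      have hmono : ∀ t ∈ L, ∀ c, c ≠ 'J' → h.count c ≤ t.count c :=
        fun t ht => pv_substs_count_le S hSJ h t ht
      have hSt : ∀ t ∈ L, ∀ c ∈ S, c ∈ t := by
        intro t ht c hc
        have h1 : 0 < h.count c := List.count_pos_iff.mpr ((hSmem c).mp hc).1
        have h2 := hmono t ht c (hSJ c hc)
        exact List.count_pos_iff.mp (by omega)
      have hj4 : j ≤ 4 := by
        by_contra hlt'
        have hle : h.count 'J' ≤ 5 := h5 ▸ List.count_le_length
        have hj5 : h.count 'J' = h.length := by rw [h5]; omega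
        exact hc0J (List.count_eq_length.mp hj5 c0 hc0h).symm
      have hlenf : (h.filter (fun c => c ≠ 'J')).length + j = 5 := by
        rw [← h5, hj]
        exact pv_filter_length_count h
      have hsum_cs : cs.sum = 5 - (j : Int) := by
        have hmcg : cs = S.map (fun c => (((h.filter (fun x => x ≠ 'J')).count c : Nat) : Int)) := by
          rw [hcs]
          refine List.map_congr_left (fun c hc => ?_)
          rw [hcnt5, hfil5 c hc]
        rw [hmcg, pv_sum_counts S (h.filter (fun c => c ≠ 'J')) hSnd
          (fun x hx => (hfilmem x).mp hx) (fun c hc => (hfilmem c).mpr hc)]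
        omega
      have hcs1 : ∀ x ∈ cs, 1 ≤ x := by
        intro x hx
        rw [hcs, List.mem_map] at hx
        obtain ⟨c, hc, rfl⟩ := hx
        have h0 : 0 < h.count c := List.count_pos_iff.mpr ((hSmem c).mp hc).1
        simp only [hcnt5]
        omega
      have hstate := pv_states_complete j cs hj4 hcs1 hsum_cs
      have hkey := List.all_eq_true.mp pv_key_dec (j, cs) hstate
      rw [Bool.and_eq_true] at hkey
      obtain ⟨hall, hany⟩ := hkey
      have hcsl : cs.length = S.length := by rw [hcs]; simp
      refine pv_max_eq _ _ ?_ ?_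
      · -- attained: put every joker on the cards the distribution chooses
        obtain ⟨a, hamem, haeq⟩ := List.any_eq_true.mp hany
        rw [beq_iff_eq] at haeq
        obtain ⟨halen, ha0, hasum⟩ := pv_comps_sound j cs.length a hamem
        set sup := pvSupply S a with hsup
        have hsupel : ∀ x ∈ sup, x ∈ S := pv_supply_elems S a
        have hsuplen : sup.length = j := by
          have := pv_supply_length S a ha0 (halen.trans hcsl)
          rw [hasum] at this
          exact_mod_cast this
        set t0 := pvFill h sup with ht0
        have ht0L : t0 ∈ L := pv_fill_mem_substs S h sup hsupel (by rw [hsuplen, hj])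
        have hsupcnt : S.map (fun c => ((sup.count c : Nat) : Int)) = a :=
          pv_supply_count S a hSnd (halen.trans hcsl) ha0
        have hmapt0 : S.map (fun c => (t0.count c : Int)) = List.zipWith (· + ·) cs a := by
          rw [hcs, ← hsupcnt, pv_zipWith_map]
          refine List.map_congr_left (fun c hc => ?_)
          have hfc := pv_fill_count h sup (by rw [hsuplen, hj]) c (hSJ c hc)
          rw [ht0, hfc, hcnt5, hfil5 c hc]
          push_cast
          ring
        have ht0S : ∀ x ∈ t0, x ∈ S := by
          intro x hx
          have hxJ : x ≠ 'J' := htJ t0 ht0L x hx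
          have h1 : 0 < t0.count x := List.count_pos_iff.mpr hx
          rw [ht0, pv_fill_count h sup (by rw [hsuplen, hj]) x hxJ] at h1
          by_cases h2 : 0 < (h.filter (fun y => y ≠ 'J')).count x
          · exact (hfilmem x).mp (List.count_pos_iff.mp h2)
          · have : 0 < sup.count x := by omega
            exact hsupel x (List.count_pos_iff.mp this)
        have hpermt0 : (PySem.Set.ofList t0).Perm S := by
          refine (List.perm_ext_iff_of_nodup (PySem.Set.nodup_ofList t0) hSnd).mpr
            (fun x => ?_)
          rw [PySem.Set.mem_ofList]
          exact ⟨fun hx => ht0S x hx, fun hx => hSt t0 ht0L x hx⟩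
        have hfilself : (List.zipWith (· + ·) cs a).filter (fun x => decide (0 < x))
            = List.zipWith (· + ·) cs a := by
          rw [← hmapt0]
          refine List.filter_eq_self.mpr (fun x hx => ?_)
          rw [List.mem_map] at hx
          obtain ⟨c, hc, rfl⟩ := hx
          have : 0 < t0.count c := List.count_pos_iff.mpr (hSt t0 ht0L c hc)
          simp only [decide_eq_true_eq]
          omega
        have hgt0 : g t0 = pvTarget j cs := by
          rw [hg]
          simp only []
          rw [show pvValsOf t0
              = (PySem.Set.ofList t0).map (fun c => (t0.count c : Int)) from rfl]
          rw [pv_classify_perm (hpermt0.map (fun c => (t0.count c : Int))), hmapt0]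
          calc pvB_classify (List.zipWith (· + ·) cs a)
              = pvB_classify (pvB_dsort
                  ((List.zipWith (· + ·) cs a).filter (fun x => decide (0 < x)))) := by
                rw [hfilself]
                exact pv_classify_perm
                  (PySem.List.sorted_perm (List.zipWith (· + ·) cs a) (fun x => x) true).symm
            _ = pvTarget j cs := haeq
        rw [← hgt0]
        exact List.mem_map_of_mem ht0L
      · -- bound: any distribution, including ones opening fresh cards, stays below the target
        intro w hw
        rw [List.mem_map] at hw
        obtain ⟨t, ht, rfl⟩ := hw
        set F : List Char := (PySem.Set.ofList t).filter (fun c => !(S.contains c)) with hF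
        have hFnd : F.Nodup := (PySem.Set.nodup_ofList t).filter _
        have hFmem : ∀ c, c ∈ F ↔ (c ∈ t ∧ ¬ c ∈ S) := by
          intro c
          rw [hF, List.mem_filter, PySem.Set.mem_ofList]
          simp [List.contains_eq_mem]
        set W : List Char := S ++ F with hW
        have hWnd : W.Nodup := by
          rw [hW, List.nodup_append]
          exact ⟨hSnd, hFnd, fun a ha b hb he => ((hFmem b).mp hb).2 (he ▸ ha)⟩
        have htW : ∀ x ∈ t, x ∈ W := by
          intro x hx
          rw [hW, List.mem_append]
          by_cases hxS : x ∈ S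
          · exact Or.inl hxS
          · exact Or.inr ((hFmem x).mpr ⟨hx, hxS⟩)
        have hWt : ∀ c ∈ W, c ∈ t := by
          intro c hc
          rw [hW, List.mem_append] at hc
          rcases hc with hc | hc
          · exact hSt t ht c hc
          · exact ((hFmem c).mp hc).1
        have hWJ : ∀ c ∈ W, c ≠ 'J' := fun c hc => htJ t ht c (hWt c hc)
        have hFh : ∀ c ∈ F, h.count c = 0 := by
          intro c hc
          rw [List.count_eq_zero]
          intro hch
          refine ((hFmem c).mp hc).2 ((hSmem c).mpr ⟨hch, ?_⟩)
          exact hWJ c (by rw [hW]; exact List.mem_append_right S hc)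
        have hsum_t : (W.map (fun c => (t.count c : Int))).sum = 5 := by
          rw [pv_sum_counts W t hWnd htW hWt, hLlen t ht]
          simp
        have hsum_base : (W.map cnt5).sum = 5 - (j : Int) := by
          rw [hW, List.map_append, List.sum_append]
          have hz : F.map cnt5 = F.map (fun _ => (0 : Int)) :=
            List.map_congr_left (fun c hc => by simp only [hcnt5]; rw [hFh c hc]; simp)
          rw [hz, ← hcs, hsum_cs]
          simp
        set af := W.map (fun c => (t.count c : Int) - cnt5 c) with haf
        have haf0 : ∀ x ∈ af, 0 ≤ x := by
          intro x hx
          rw [haf, List.mem_map] at hx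
          obtain ⟨c, hc, rfl⟩ := hx
          have := hmono t ht c (hWJ c hc)
          simp only [hcnt5]
          omega
        have hafsum : af.sum = (j : Int) := by
          rw [haf, pv_sum_map_sub, hsum_t, hsum_base]
          ring
        have haflen : af.length = S.length + F.length := by
          rw [haf, hW]
          simp
        have hFle : (F.length : Int) ≤ (j : Int) := by
          have h1 : ∀ x ∈ F.map (fun c => (t.count c : Int)), 1 ≤ x := by
            intro x hx
            rw [List.mem_map] at hx
            obtain ⟨c, hc, rfl⟩ := hx
            have : 0 < t.count c :=
              List.count_pos_iff.mpr (hWt c (by rw [hW]; exact List.mem_append_right S hc))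
            omega
          have h2 := pv_length_le_sum _ h1
          rw [List.length_map] at h2
          have h3 : (S.map (fun c => (t.count c : Int))).sum
              + (F.map (fun c => (t.count c : Int))).sum = 5 := by
            rw [← List.sum_append, ← List.map_append, ← hW]
            exact hsum_t
          have h4 : (S.map cnt5).sum ≤ (S.map (fun c => (t.count c : Int))).sum := by
            refine List.sum_le_sum (fun c hc => ?_)
            have := hmono t ht c (hSJ c hc)
            simp only [hcnt5]
            omega
          have h5' : (S.map cnt5).sum = 5 - (j : Int) := by rw [← hcs]; exact hsum_cs
          omega
        have hFlen : F.length ≤ j := by exact_mod_cast hFle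
        set a' := af ++ List.replicate (j - F.length) (0 : Int) with ha'
        have ha'mem : a' ∈ pvComps j (cs.length + j) := by
          refine pv_comps_complete a' j (cs.length + j) ?_ ?_ ?_
          · rw [ha', List.length_append, haflen, List.length_replicate, hcsl]
            omega
          · intro x hx
            rw [ha', List.mem_append] at hx
            rcases hx with hx | hx
            · exact haf0 x hx
            · rw [List.eq_of_mem_replicate hx]
          · rw [ha', List.sum_append, hafsum]
            simp
        have hallkey := List.all_eq_true.mp hall a' ha'mem
        rw [decide_eq_true_eq] at hallkey
        have hzipS : List.zipWith (· + ·) cs (S.map (fun c => (t.count c : Int) - cnt5 c))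
            = S.map (fun c => (t.count c : Int)) := by
          rw [hcs, pv_zipWith_map]
          exact List.map_congr_left (fun c hc => by ring)
        have hafF : F.map (fun c => (t.count c : Int) - cnt5 c)
            = F.map (fun c => (t.count c : Int)) :=
          List.map_congr_left (fun c hc => by simp only [hcnt5]; rw [hFh c hc]; simp)
        have hposW : ∀ (l : List Char), (∀ c ∈ l, c ∈ t) →
            (l.map (fun c => (t.count c : Int))).filter (fun x => decide (0 < x))
              = l.map (fun c => (t.count c : Int)) := by
          intro l hl
          refine List.filter_eq_self.mpr (fun x hx => ?_)
          rw [List.mem_map] at hx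
          obtain ⟨c, hc, rfl⟩ := hx
          have : 0 < t.count c := List.count_pos_iff.mpr (hl c hc)
          simp only [decide_eq_true_eq]
          omega
        have hzip : (List.zipWith (· + ·) (cs ++ List.replicate j (0 : Int)) a').filter
            (fun x => decide (0 < x)) = W.map (fun c => (t.count c : Int)) := by
          rw [ha', haf, hW, List.map_append]
          rw [show List.replicate j (0 : Int)
              = List.replicate F.length (0 : Int) ++ List.replicate (j - F.length) (0 : Int) from by
            rw [← List.replicate_add]
            congr 1
            omega]
          rw [List.append_assoc]
          rw [List.zipWith_append (by rw [hcsl]; simp)]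
          rw [List.zipWith_append (by simp)]
          rw [hzipS, hafF]
          rw [show List.zipWith (· + ·) (List.replicate F.length (0 : Int))
              (F.map (fun c => (t.count c : Int)))
              = F.map (fun c => (t.count c : Int)) from by
            have hzz := pv_zip_zero (F.map (fun c => (t.count c : Int)))
            rwa [List.length_map] at hzz]
          rw [show List.zipWith (· + ·) (List.replicate (j - F.length) (0 : Int))
              (List.replicate (j - F.length) (0 : Int))
              = List.replicate (j - F.length) (0 : Int) from by
            have hzz := pv_zip_zero (List.replicate (j - F.length) (0 : Int))
            rwa [List.length_replicate] at hzz]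
          rw [List.filter_append, List.filter_append]
          rw [hposW S (fun c hc => hSt t ht c hc),
            hposW F (fun c hc => ((hFmem c).mp hc).1)]
          rw [show (List.replicate (j - F.length) (0 : Int)).filter
              (fun x => decide (0 < x)) = [] from by simp]
          rw [List.map_append]
          simp
        have hpermW : (PySem.Set.ofList t).Perm W := by
          refine (List.perm_ext_iff_of_nodup (PySem.Set.nodup_ofList t) hWnd).mpr (fun x => ?_)
          rw [PySem.Set.mem_ofList]
          exact ⟨fun hx => htW x hx, fun hx => hWt x hx⟩
        calc g t = pvB_classify (pvValsOf t) := rfl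
          _ = pvB_classify (W.map (fun c => (t.count c : Int))) := by
              rw [show pvValsOf t
                  = (PySem.Set.ofList t).map (fun c => (t.count c : Int)) from rfl]
              exact pv_classify_perm (hpermW.map (fun c => (t.count c : Int)))
          _ = pvB_classify (pvB_dsort ((List.zipWith (· + ·) (cs ++ List.replicate j (0 : Int)) a').filter
                (fun x => decide (0 < x)))) := by
              rw [hzip]
              exact pv_classify_perm
                (PySem.List.sorted_perm (W.map (fun c => (t.count c : Int))) (fun x => x) true).symm
          _ ≤ pvTarget j cs := hallkey

-- ---- the tie-break loops agree when the first differing pair is in the card table ----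

theorem pv_card_table :
    (pvCards.all (fun c =>
      match PySem.List.index? pvB_order c with
      | some i => pvA_card_values.get? c == some ((i : Int) + 1)
      | none => false)) = true := by
  decide

theorem pv_tie_eq (pairs : List (Char × Char))
    (hc : ((pairs.dropWhile (fun p => p.1 == p.2)).isEmpty
        || (pvCards.contains ((pairs.dropWhile (fun p => p.1 == p.2)).headD ('A', 'A')).1
          && pvCards.contains ((pairs.dropWhile (fun p => p.1 == p.2)).headD ('A', 'A')).2)) = true) :
    pvA_tie_loop pairs = pvB_tie_loop pairs := by
  induction pairs with
  | nil => rfl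
  | cons p rest ih =>
    obtain ⟨c1, c2⟩ := p
    rw [List.dropWhile_cons] at hc
    by_cases he : c1 = c2
    · rw [if_pos (by simp [he])] at hc
      simp only [pvA_tie_loop, pvB_tie_loop, if_pos he]
      exact ih hc
    · rw [if_neg (by simp [he])] at hc
      simp only [List.isEmpty_cons, List.headD_cons, Bool.false_or, Bool.and_eq_true,
        List.contains_eq_mem, decide_eq_true_eq] at hc
      obtain ⟨hm1, hm2⟩ := hc
      have h1 := List.all_eq_true.mp pv_card_table c1 hm1
      have h2 := List.all_eq_true.mp pv_card_table c2 hm2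
      simp only [pvA_tie_loop, pvB_tie_loop]
      rw [if_neg he, if_neg he]
      cases hi1 : PySem.List.index? pvB_order c1 with
      | none => rw [hi1] at h1; simp at h1
      | some i1 =>
        cases hi2 : PySem.List.index? pvB_order c2 with
        | none => rw [hi2] at h2; simp at h2
        | some i2 =>
          rw [hi1] at h1; rw [hi2] at h2
          simp only [beq_iff_eq] at h1 h2
          rw [h1, h2]
          show some ((i1 : Int) + 1 - ((i2 : Int) + 1)) = some ((i1 : Int) - (i2 : Int))
          congr 1
          ring

-- ===== VERDICT (by name: the statement is the Claim_ definition above) =====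
theorem compare_for_second_part_spec : Claim_equal_compare_for_second_part := by
  intro item1 item2 _hdom hpre
  obtain ⟨h1len, h2len, hpair⟩ := hpre
  cases item1 with
  | nil => simp at h1len
  | cons s1 r1 =>
    cases item2 with
    | nil => simp at h2len
    | cons s2 r2 =>
      have hp : pvPairOK s1.toList s2.toList = true := by simpa [List.getD] using hpair
      unfold Spec_compare_for_second_part compare_for_second_part compare_for_second_part_alt
      rw [PySem.List.pyGet?_zero_cons, PySem.List.pyGet?_zero_cons]
      simp only []
      rw [pvPairOK] at hp
      simp only [Bool.or_eq_true, Bool.and_eq_true] at hp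
      rcases hp with ⟨heqb, _⟩ | ⟨⟨hok1, hok2⟩, hrest⟩
      · -- equal hands: both programs answer 0 (A's side even if its evaluation yields nothing)
        have heq : s1.toList = s2.toList := by simpa using heqb
        rw [← heq]
        cases hg : pvA_get_value_card_with_jokers s1.toList with
        | none =>
          simp [pv_tieB_self]
        | some t =>
          simp [pv_tieA_self, pv_tieB_self]
      · -- two acceptable hands: the strengths agree (pv_main_hand), then either the tie-break
        -- loops agree or the types differ and neither loop runs
        rw [pv_main_hand s1.toList hok1, pv_main_hand s2.toList hok2]
        simp only []
        set t1 := pvB_strength s1.toList with ht1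
        set t2 := pvB_strength s2.toList with ht2
        rcases hrest with htie' | hrank
        · have htie : pvA_tie_loop (s1.toList.zip s2.toList)
              = pvB_tie_loop (s1.toList.zip s2.toList) := by
            refine pv_tie_eq _ ?_
            simpa only [pvTieB] using htie'
          rcases lt_trichotomy t1 t2 with hlt | heq | hgt
          · rw [if_neg (by omega), if_pos hlt, if_pos (by omega)]
            rw [if_neg (by omega)]
          · rw [if_neg (by omega), if_neg (by omega), if_neg (by omega), htie]
          · rw [if_pos hgt, if_pos (by omega), if_pos (by omega)]
        · have hne : t1 ≠ t2 := by
            cases hr1 : pvPreRank s1.toList with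
            | none =>
              rw [hr1] at hrank
              cases hr2 : pvPreRank s2.toList <;> rw [hr2] at hrank <;> simp at hrank
            | some rr1 =>
              cases hr2 : pvPreRank s2.toList with
              | none => rw [hr1, hr2] at hrank; simp at hrank
              | some rr2 =>
                rw [hr1, hr2] at hrank
                rw [ht1, ht2, pv_rank_strength _ _ hr1, pv_rank_strength _ _ hr2]
                simpa using hrank
          rcases lt_trichotomy t1 t2 with hlt | heq | hgt
          · rw [if_neg (by omega), if_pos hlt, if_pos (by omega), if_neg (by omega)]
          · exact absurd heq hne
          · rw [if_pos hgt, if_pos (by omega), if_pos (by omega)]
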